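-- pv_equiv track=rewrite | github.com/deantgao/gene_editing | knock_in_editing.py | isSeqValid
-- ===== SOURCE A (Python) =====
-- import itertools
--
-- def isSeqValid(primer):
--     '''
--     Determines whether a single arm primer is valid
--
--     Returns --> True if primer is valid else False
--     '''
--     def moreThan4Runs(sequence):
--         '''
--         Checks whether there is any single base that appears more than 4 times consecutively in the sequence.
--
--         Returns --> True if there are more than 4 else False
--         '''
--         prev = sequence[0]
--         consecutive_runs = 1
--         for nucleo in sequence[1 : ]:
--             if prev == nucleo:
--                 consecutive_runs += 1
--             else:
--                 prev = nucleo
--                 consecutive_runs = 1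
--             if consecutive_runs > 4:
--                 return True
--         return False
--
--     def moreThan4Repeats(sequence):
--         '''
--         Checks whether there are any di-nucleotide sequences that repeat more than 4 times consecutively in
--         the sequence.
--
--         Returns --> True if there are more than 4 else False
--         '''
--         nucleos = 'ATCG'
--         repeats = set()
--         for pair in itertools.combinations(nucleos, 2):
--             repeats.add(''.join(pair * 5))
--         for repeat in repeats:
--             if repeat in sequence:
--                 return True
--         return False
--
--     if moreThan4Runs(primer):
--         return False
--     if moreThan4Repeats(primer):
--         return False
--     return True
-- ===== SOURCE B (Python) =====
-- import itertools
--
-- def isSeqValid(primer):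
--     '''
--     Determines whether a single arm primer is valid
--
--     Returns --> True if primer is valid else False
--     '''
--     forbidden = [c * 5 for c in dict.fromkeys(primer)]
--     forbidden += [(a + b) * 5 for a, b in itertools.combinations('ATCG', 2)]
--     return not any(pat in primer for pat in forbidden)
-- ===== Notes on version B (the rewrite author's own statement) =====
-- stated objective: simpler
-- what changed: Replaces A's stateful consecutive-run scan plus a separate set-driven repeat loop by one forbidden-substring table (a 5-fold run pattern for each distinct character of the primer plus the six dinucleotide patterns) and a single any-membership test.
import Mathlib
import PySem

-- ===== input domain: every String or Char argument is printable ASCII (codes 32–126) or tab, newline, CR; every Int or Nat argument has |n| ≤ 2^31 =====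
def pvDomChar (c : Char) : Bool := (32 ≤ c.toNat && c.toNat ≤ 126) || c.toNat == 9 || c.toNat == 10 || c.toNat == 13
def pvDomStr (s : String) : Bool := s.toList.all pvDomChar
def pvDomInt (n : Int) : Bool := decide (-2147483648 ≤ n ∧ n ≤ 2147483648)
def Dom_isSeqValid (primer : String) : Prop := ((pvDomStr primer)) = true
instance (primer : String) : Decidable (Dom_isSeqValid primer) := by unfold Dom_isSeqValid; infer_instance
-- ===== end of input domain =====

-- B replaces A's two scanning helpers by one forbidden-substring table (run patterns for the
-- characters occurring in the primer plus the six dinucleotide patterns); objective: simpler.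

-- ===== PORT A =====
-- inner loop of moreThan4Runs: state (prev, consecutive_runs)
def pvRunsLoop (prev : Char) (cnt : Int) : List Char → Bool
  | [] => false
  | nucleo :: rest =>
    let prev' := if prev == nucleo then prev else nucleo
    let cnt' := if prev == nucleo then cnt + 1 else 1
    if cnt' > 4 then true else pvRunsLoop prev' cnt' rest

-- sequence[0] raises IndexError on the empty list; Pre_ excludes "" so the [] branch is unreachable
def pvMoreThan4Runs : List Char → Bool
  | [] => false
  | c :: rest => pvRunsLoop c 1 rest

-- repeats = set(); for pair in itertools.combinations('ATCG', 2): repeats.add(''.join(pair * 5))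
def pvRepeatsSet : PySem.Set (List Char) :=
  ([('A','T'),('A','C'),('A','G'),('T','C'),('T','G'),('C','G')]).foldl
    (fun s p => PySem.Set.add s [p.1, p.2, p.1, p.2, p.1, p.2, p.1, p.2, p.1, p.2])
    PySem.Set.empty

-- for repeat in repeats: if repeat in sequence: return True / return False
def pvMoreThan4Repeats (sequence : List Char) : Bool :=
  pvRepeatsSet.any (fun r => PySem.Chars.isIn r sequence)

def isSeqValid (primer : String) : Bool :=
  if pvMoreThan4Runs primer.toList then false
  else if pvMoreThan4Repeats primer.toList then false
  else true

-- ===== PORT B =====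
-- [(a + b) * 5 for a, b in itertools.combinations('ATCG', 2)]
def pvDinucs : List (List Char) :=
  ([('A','T'),('A','C'),('A','G'),('T','C'),('T','G'),('C','G')]).map
    (fun p => [p.1, p.2, p.1, p.2, p.1, p.2, p.1, p.2, p.1, p.2])

def isSeqValid_alt (primer : String) : Bool :=
  let forbidden :=
    (PySem.List.dedup primer.toList).map (fun c => List.replicate 5 c) ++ pvDinucs
  !(forbidden.any (fun pat => PySem.Chars.isIn pat primer.toList))

-- ===== PRECONDITION & SPEC =====
-- Pre_ excludes only the empty string, on which A's sequence[0] raises IndexError.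
def Pre_isSeqValid (primer : String) : Prop := primer ≠ ""
instance (primer : String) : Decidable (Pre_isSeqValid primer) := by unfold Pre_isSeqValid; infer_instance
def pvWitness_isSeqValid : String := "ATCG"

def Spec_isSeqValid (primer : String) (out : Bool) : Prop := out = isSeqValid_alt primer
instance (primer : String) (out : Bool) : Decidable (Spec_isSeqValid primer out) := by unfold Spec_isSeqValid; infer_instance

-- ===== CLAIM (what is proved, stated in full; the proofs are below) =====
def Claim_equal_isSeqValid : Prop := ∀ (primer : String), Dom_isSeqValid primer → Pre_isSeqValid primer → Spec_isSeqValid primer (isSeqValid primer)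

-- ===== LEMMAS AND PROOFS =====

-- the six dinucleotide checks are the same disjunction on both sides
lemma repeats_eq (l : List Char) :
    pvMoreThan4Repeats l = pvDinucs.any (fun p => PySem.Chars.isIn p l) := by
  simp [pvMoreThan4Repeats, pvRepeatsSet, pvDinucs, PySem.Set.add, PySem.Set.empty,
    PySem.Set.contains, List.foldl, List.any]

-- a prefix made of 5 equal characters starting in the block 'replicate m prev' reaches x
lemma repl_prefix (c prev x : Char) (rs : List Char) :
    ∀ (m n : Nat), m < n →
      List.replicate n c <+: (List.replicate m prev ++ x :: rs) →
      c = x ∧ (m ≠ 0 → c = prev) := by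
  intro m
  induction m generalizing rs with
  | zero =>
    intro n hn h
    obtain ⟨n', rfl⟩ : ∃ n', n = n' + 1 := ⟨n - 1, by omega⟩
    rw [List.replicate_succ] at h
    simp only [List.replicate_zero, List.nil_append, List.cons_prefix_cons] at h
    exact ⟨h.1, by simp⟩
  | succ m ih =>
    intro n hn h
    obtain ⟨n', rfl⟩ : ∃ n', n = n' + 1 := ⟨n - 1, by omega⟩
    rw [List.replicate_succ, List.replicate_succ] at h
    simp only [List.cons_append, List.cons_prefix_cons] at h
    obtain ⟨hcp, h'⟩ := h
    exact ⟨(ih rs n' (by omega) h').1, fun _ => hcp⟩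

-- a run of 5 inside 'replicate m prev ++ x :: rs' (m ≤ 4, prev ≠ x) lies inside 'x :: rs'
lemma infix_drop_block (c prev x : Char) (rs : List Char) (hne : prev ≠ x) :
    ∀ m, m ≤ 4 →
      (List.replicate 5 c <:+: (List.replicate m prev ++ x :: rs) ↔
       List.replicate 5 c <:+: x :: rs) := by
  intro m
  induction m with
  | zero => simp
  | succ m ih =>
    intro hm
    constructor
    · intro h
      rcases List.infix_cons_iff.mp (by simpa [List.replicate_succ] using h) with hpre | htail
      · have := repl_prefix c prev x rs (m + 1) 5 (by omega)
          (by simpa [List.replicate_succ] using hpre)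
        exact absurd (this.1 ▸ this.2 (by omega)) (Ne.symm hne)
      · exact (ih (by omega)).mp htail
    · intro h
      exact h.trans (List.suffix_append (List.replicate (m+1) prev) (x :: rs)).isInfix

-- characterization of A's run scan: a run of 5 equal characters exists
lemma runsLoop_iff (rest : List Char) :
    ∀ (prev : Char) (m : Nat), 1 ≤ m → m ≤ 4 →
      (pvRunsLoop prev (m : Int) rest = true ↔
       ∃ c, List.replicate 5 c <:+: (List.replicate m prev ++ rest)) := by
  induction rest with
  | nil =>
    intro prev m h1 h4
    simp only [pvRunsLoop, List.append_nil]
    refine iff_of_false (by simp) ?_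
    rintro ⟨c, hinf⟩
    have := hinf.length_le
    simp [List.length_replicate] at this
    omega
  | cons x rs ih =>
    intro prev m h1 h4
    by_cases hpx : prev = x
    · subst hpx
      by_cases hm4 : m = 4
      · subst hm4
        constructor
        · intro _
          refine ⟨prev, ?_⟩
          have h5 : List.replicate 5 prev ++ rs = List.replicate 4 prev ++ prev :: rs := by
            show List.replicate (4 + 1) prev ++ rs = _
            rw [List.replicate_succ', List.append_assoc]
            rfl
          rw [← h5]
          exact (List.prefix_append (List.replicate 5 prev) rs).isInfix
        · intro _
          simp [pvRunsLoop]
      · have hlt : (m : Int) + 1 ≤ 4 := by omega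
        have : pvRunsLoop prev (m : Int) (prev :: rs) = pvRunsLoop prev ((m : Int) + 1) rs := by
          simp [pvRunsLoop]; omega
        rw [this]
        have hcast : ((m : Int) + 1) = ((m + 1 : Nat) : Int) := by push_cast; ring
        rw [hcast, ih prev (m + 1) (by omega) (by omega)]
        constructor
        · rintro ⟨c, hc⟩
          exact ⟨c, by simpa [List.replicate_succ', List.append_assoc] using hc⟩
        · rintro ⟨c, hc⟩
          exact ⟨c, by simpa [List.replicate_succ', List.append_assoc] using hc⟩
    · have : pvRunsLoop prev (m : Int) (x :: rs) = pvRunsLoop x 1 rs := by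
        simp [pvRunsLoop, hpx]
      rw [this]
      have h1' : ((1 : Nat) : Int) = (1 : Int) := by norm_num
      rw [← h1', ih x 1 (by omega) (by omega)]
      simp only [List.replicate_one, List.singleton_append]
      constructor
      · rintro ⟨c, hc⟩; exact ⟨c, (infix_drop_block c prev x rs hpx m h4).mpr hc⟩
      · rintro ⟨c, hc⟩; exact ⟨c, (infix_drop_block c prev x rs hpx m h4).mp hc⟩

-- ===== VERDICT (by name: the statement is the Claim_ definition above) =====
theorem isSeqValid_spec : Claim_equal_isSeqValid := by
  intro primer _ hpre
  unfold Spec_isSeqValid isSeqValid isSeqValid_alt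
  have hl : primer.toList ≠ [] := by
    intro h
    exact hpre (String.toList_eq_nil_iff.mp h)
  obtain ⟨c, rest, hcr⟩ := List.exists_cons_of_ne_nil hl
  have hruns : pvMoreThan4Runs primer.toList
      = (PySem.List.dedup primer.toList).any
          (fun d => PySem.Chars.isIn (List.replicate 5 d) primer.toList) := by
    rw [Bool.eq_iff_iff, List.any_eq_true]
    constructor
    · intro h
      rw [hcr] at h
      simp only [pvMoreThan4Runs] at h
      have h1 : pvRunsLoop c ((1 : Nat) : Int) rest = true := by simpa using h
      obtain ⟨d, hd⟩ := (runsLoop_iff rest c 1 le_rfl (by omega)).mp h1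
      rw [List.replicate_one, List.singleton_append, ← hcr] at hd
      refine ⟨d, ?_, (PySem.Chars.isIn_iff_infix _ _).mpr hd⟩
      rw [PySem.List.mem_dedup]
      exact hd.sublist.subset (List.mem_replicate.mpr ⟨by norm_num, rfl⟩)
    · rintro ⟨d, _, hd⟩
      have hinf := (PySem.Chars.isIn_iff_infix _ _).mp hd
      rw [hcr] at hinf ⊢
      simp only [pvMoreThan4Runs]
      have h1 : pvRunsLoop c ((1 : Nat) : Int) rest = true :=
        (runsLoop_iff rest c 1 le_rfl (by omega)).mpr
          ⟨d, by simpa [List.replicate_one, List.singleton_append] using hinf⟩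
      simpa using h1
  simp only [List.any_append, List.any_map, Function.comp_def]
  rw [← hruns, ← repeats_eq]
  cases hR : pvMoreThan4Runs primer.toList <;>
    cases hP : pvMoreThan4Repeats primer.toList <;> simp
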